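-- pv_equiv track=rewrite | github.com/xile42/leetcode | python3/2320. 统计放置房子的方式数.py | countHousePlacements
-- ===== SOURCE A (Python) =====
-- def countHousePlacements(n: int) -> int:
--
--     base = pow(10, 9) + 7
--     dp = [0] * (n + 1)
--     dp[0] = 1
--     dp[1] = 2
--     for i in range(2, n + 1):
--         dp[i] = (dp[i-1] + dp[i-2]) % base
--
--     return (dp[-1] ** 2) % base
-- ===== SOURCE B (Python) =====
-- def countHousePlacements(n: int) -> int:
--     M = pow(10, 9) + 7
--
--     def fd(k):
--         # returns (F(k) % M, F(k+1) % M) for the standard Fibonacci F(0)=0, F(1)=1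
--         if k == 0:
--             return (0, 1)
--         a, b = fd(k >> 1)
--         c = a * (2 * b - a) % M
--         d = (a * a + b * b) % M
--         if k & 1:
--             return (d, (c + d) % M)
--         else:
--             return (c, d)
--
--     f = fd(n + 2)[0]
--     return f * f % M
-- ===== Notes on version B (the rewrite author's own statement) =====
-- stated objective: faster
-- what changed: Replaces the O(n) DP array over all indices by fast-doubling Fibonacci modular exponentiation: the answer is F(n+2)^2 mod 10^9+7, computed in O(log n).
import Mathlib
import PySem

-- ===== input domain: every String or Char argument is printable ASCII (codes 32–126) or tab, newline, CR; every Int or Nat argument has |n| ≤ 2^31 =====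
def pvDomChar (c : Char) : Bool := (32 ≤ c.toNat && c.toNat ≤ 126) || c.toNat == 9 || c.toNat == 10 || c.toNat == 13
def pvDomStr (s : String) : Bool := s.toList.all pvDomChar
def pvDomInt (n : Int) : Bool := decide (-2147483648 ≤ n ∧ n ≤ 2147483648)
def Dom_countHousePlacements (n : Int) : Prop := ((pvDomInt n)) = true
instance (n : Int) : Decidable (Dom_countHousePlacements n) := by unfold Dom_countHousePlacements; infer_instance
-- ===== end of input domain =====

-- B replaces A's O(n) DP array by fast-doubling Fibonacci mod 10^9+7 (answer = F(n+2)^2 mod p), O(log n).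

-- ===== PORT A =====
def countHousePlacements (n : Int) : Int :=
  let base : Int := 10 ^ 9 + 7
  let dp : List Int := List.replicate (n + 1).toNat 0
  let dp := PySem.List.pySetD dp 0 1
  let dp := PySem.List.pySetD dp 1 2
  let dp := (PySem.List.pyRange 2 (n + 1) 1).foldl
    (fun dp i => PySem.List.pySetD dp i
      (PySem.Int.mod (PySem.List.pyGetD dp (i - 1) 0 + PySem.List.pyGetD dp (i - 2) 0) base)) dp
  PySem.Int.mod ((PySem.List.pyGetD dp (-1) 0) ^ 2) base

-- ===== PORT B =====
def pvM : Int := 10 ^ 9 + 7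

-- fast-doubling helper fd of Source B: returns (F(k) % M, F(k+1) % M)
def fastFib (k : Nat) : Int × Int :=
  if k = 0 then (0, 1)
  else
    let p := fastFib (k / 2)
    let a := p.1
    let b := p.2
    let c := PySem.Int.mod (a * (2 * b - a)) pvM
    let d := PySem.Int.mod (a * a + b * b) pvM
    if k % 2 = 1 then (d, PySem.Int.mod (c + d) pvM) else (c, d)
termination_by k
decreasing_by omega

def countHousePlacements_alt (n : Int) : Int :=
  let f := (fastFib (n + 2).toNat).1
  PySem.Int.mod (f * f) pvM

-- ===== PRECONDITION & SPEC =====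
-- A raises IndexError for n ≤ 0 (dp[1] = 2 on a list of length ≤ 1)
def Pre_countHousePlacements (n : Int) : Prop := 1 ≤ n
instance (n : Int) : Decidable (Pre_countHousePlacements n) := by unfold Pre_countHousePlacements; infer_instance
def pvWitness_countHousePlacements : Int := 3

def Spec_countHousePlacements (n : Int) (out : Int) : Prop := out = countHousePlacements_alt n
instance (n : Int) (out : Int) : Decidable (Spec_countHousePlacements n out) := by unfold Spec_countHousePlacements; infer_instance

-- ===== CLAIM (what is proved, stated in full; the proofs are below) =====
def Claim_equal_countHousePlacements : Prop := ∀ (n : Int), Dom_countHousePlacements n → Pre_countHousePlacements n → Spec_countHousePlacements n (countHousePlacements n)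

-- ===== LEMMAS AND PROOFS =====

-- A's recurrence value: dp[k] = fibm k
def fibm : Nat → Int
  | 0 => 1
  | 1 => 2
  | (k+2) => PySem.Int.mod (fibm (k+1) + fibm k) pvM

lemma pvM_pos : (0:Int) < pvM := by norm_num [pvM]

lemma pymod_eq (a : Int) : PySem.Int.mod a pvM = a % pvM :=
  PySem.Int.mod_eq_emod_of_pos pvM_pos

lemma addmod (x y : Int) : (x % pvM + y % pvM) % pvM = (x + y) % pvM := by
  rw [Int.add_emod x y]

lemma fibm_eq (k : Nat) : fibm k = ((Nat.fib (k+2) : Int)) % pvM := by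
  induction k using fibm.induct with
  | case1 => norm_num [fibm, pvM]
  | case2 => norm_num [fibm, pvM]
  | case3 k ih1 ih2 =>
      rw [fibm, ih1, ih2, pymod_eq, addmod]
      have h : Nat.fib (k + 2 + 2) = Nat.fib (k + 3) + Nat.fib (k + 2) := by
        rw [Nat.fib_add_two]; ring_nf
      rw [h]; push_cast; ring_nf

lemma modeq_self (x : Int) : x % pvM ≡ x [ZMOD pvM] :=
  Int.emod_emod_of_dvd x dvd_rfl

-- the two fast-doubling identities, modular form
lemma doubling (m : Nat) :
    ((Nat.fib m : Int) % pvM * (2 * ((Nat.fib (m+1) : Int) % pvM) - (Nat.fib m : Int) % pvM)) % pvM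
      = (Nat.fib (2*m) : Int) % pvM
  ∧ ((Nat.fib m : Int) % pvM * ((Nat.fib m : Int) % pvM)
      + (Nat.fib (m+1) : Int) % pvM * ((Nat.fib (m+1) : Int) % pvM)) % pvM
      = (Nat.fib (2*m+1) : Int) % pvM := by
  have hle : Nat.fib m ≤ 2 * Nat.fib (m+1) := by
    have := Nat.fib_le_fib_succ (n := m); omega
  have heven : (Nat.fib (2*m) : Int)
      = (Nat.fib m : Int) * (2 * (Nat.fib (m+1) : Int) - (Nat.fib m : Int)) := by
    rw [Nat.fib_two_mul]; push_cast [hle]; ring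
  have hodd : (Nat.fib (2*m+1) : Int)
      = (Nat.fib m : Int) * (Nat.fib m : Int) + (Nat.fib (m+1) : Int) * (Nat.fib (m+1) : Int) := by
    rw [Nat.fib_two_mul_add_one]; push_cast; ring
  have Ha := modeq_self (Nat.fib m : Int)
  have Hb := modeq_self (Nat.fib (m+1) : Int)
  constructor
  · rw [heven]
    exact Ha.mul (((Int.ModEq.refl 2).mul Hb).sub Ha)
  · rw [hodd]
    exact (Ha.mul Ha).add (Hb.mul Hb)

lemma fastFib_eq (k : Nat) :
    fastFib k = ((Nat.fib k : Int) % pvM, (Nat.fib (k+1) : Int) % pvM) := by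
  induction k using fastFib.induct with
  | case1 => rw [fastFib]; norm_num [pvM]
  | case2 k hk hmod ih =>
      obtain ⟨m, rfl⟩ : ∃ m, k = 2*m+1 := ⟨k / 2, by omega⟩
      have hdiv : (2*m+1) / 2 = m := by omega
      rw [hdiv] at ih
      rw [fastFib]
      simp only [if_neg hk, if_pos hmod, hdiv, ih, pymod_eq, Prod.mk.injEq]
      obtain ⟨hc, hd⟩ := doubling m
      refine ⟨hd, ?_⟩
      rw [hc, hd, addmod]
      have h : Nat.fib (2*m+1+1) = Nat.fib (2*m) + Nat.fib (2*m+1) := by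
        rw [show 2*m+1+1 = 2*m+2 from rfl, Nat.fib_add_two]
      rw [h]; push_cast; ring_nf
  | case3 k _hk hmod ih =>
      obtain ⟨m, rfl⟩ : ∃ m, k = 2*m := ⟨k / 2, by omega⟩
      have hdiv : (2*m) / 2 = m := by omega
      rw [hdiv] at ih
      rw [fastFib]
      simp only [if_neg _hk, if_neg hmod, hdiv, ih, pymod_eq, Prod.mk.injEq]
      obtain ⟨hc, hd⟩ := doubling m
      exact ⟨hc, hd⟩

-- A's loop
def stepA (dp : List Int) (i : Int) : List Int :=
  PySem.List.pySetD dp i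
    (PySem.Int.mod (PySem.List.pyGetD dp (i - 1) 0 + PySem.List.pyGetD dp (i - 2) 0) (10 ^ 9 + 7))

lemma set_map_range (n k : Nat) (f : Nat → Int) (v : Int) (_hk : k < n) :
    ((List.range n).map f).set k v = (List.range n).map (fun j => if j = k then v else f j) := by
  apply List.ext_getElem (by simp)
  intro j h1 h2
  simp only [List.getElem_set, List.getElem_map, List.getElem_range]
  split_ifs with h h' h' <;> first | rfl | omega

lemma getD_map_range' (n k : Nat) (f : Nat → Int) (hk : k < n) :
    ((List.range n).map f).getD k 0 = f k := by
  rw [List.getD_eq_getElem _ _ (by simpa using hk)]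
  simp

lemma initA (N : Nat) :
    PySem.List.pySetD (PySem.List.pySetD (List.replicate (N+1) (0:Int)) 0 1) 1 2
    = if N = 0 then [1] else (List.range (N+1)).map (fun j => if j ≤ 1 then fibm j else 0) := by
  rw [PySem.List.pySetD_of_nonneg (i := 1) _ _ (by norm_num),
      PySem.List.pySetD_of_nonneg (i := 0) _ _ (by norm_num)]
  norm_num
  split_ifs with h
  · subst h; rfl
  · apply List.ext_getElem (by simp)
    intro j h1 h2
    simp only [List.getElem_set, List.getElem_replicate, List.getElem_map, List.getElem_range]
    rcases j with _ | _ | j <;> simp [fibm]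

lemma loopA_state (N : Nat) (hN : 1 ≤ N) : ∀ i : Nat, 1 ≤ i → i ≤ N →
    (PySem.List.pyRange 2 ((i:Int)+1) 1).foldl stepA
      (PySem.List.pySetD (PySem.List.pySetD (List.replicate (N+1) (0:Int)) 0 1) 1 2)
    = (List.range (N+1)).map (fun j => if j ≤ i then fibm j else 0) := by
  intro i hi1 hiN
  induction i with
  | zero => omega
  | succ i ih =>
      rcases Nat.eq_or_lt_of_le hi1 with h1 | h1
      · -- i + 1 = 1
        have : i = 0 := by omega
        subst this
        rw [PySem.List.pyRange_one_eq_nil (by norm_num), List.foldl_nil, initA]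
        rw [if_neg (by omega)]
      · have hi : 1 ≤ i := by omega
        have hrange : PySem.List.pyRange 2 (((i+1:Nat):Int)+1) 1
            = PySem.List.pyRange 2 ((i:Int)+1) 1 ++ [((i:Int)+1)] := by
          have h : (((i+1:Nat):Int)+1) = ((i:Int)+1) + 1 := by push_cast; ring
          rw [h, PySem.List.pyRange_one_succ_right (by omega)]
        rw [hrange, List.foldl_append, ih hi (by omega), List.foldl_cons, List.foldl_nil]
        -- one step of the loop at index i+1
        set f : Nat → Int := fun j => if j ≤ i then fibm j else 0 with hf
        have hlen : ((List.range (N+1)).map f).length = N + 1 := by simp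
        have hg1 : PySem.List.pyGetD ((List.range (N+1)).map f) ((i:Int)+1-1) 0 = fibm i := by
          rw [show ((i:Int)+1-1) = ((i:Nat):Int) by ring]
          rw [PySem.List.pyGetD_natCast]
          rw [getD_map_range' _ _ _ (by omega), hf]
          simp
        have hg2 : PySem.List.pyGetD ((List.range (N+1)).map f) ((i:Int)+1-2) 0 = fibm (i-1) := by
          rw [show ((i:Int)+1-2) = ((i-1:Nat):Int) by omega]
          rw [PySem.List.pyGetD_natCast]
          rw [getD_map_range' _ _ _ (by omega), hf]
          simp only [if_pos (by omega : i - 1 ≤ i)]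
        have hval : PySem.Int.mod (fibm i + fibm (i-1)) (10^9+7) = fibm (i+1) := by
          conv_rhs => rw [show i+1 = (i-1)+2 by omega, fibm]
          rw [show i-1+1 = i by omega, pvM]
        unfold stepA
        rw [hg1, hg2, hval]
        rw [show ((i:Int)+1) = (((i+1:Nat)):Int) by push_cast; ring]
        rw [PySem.List.pySetD_natCast, set_map_range _ _ _ _ (by omega)]
        apply List.map_congr_left
        intro j hj
        simp only [hf]
        split_ifs <;> first | rfl | omega | simp_all

-- ===== VERDICT (by name: the statement is the Claim_ definition above) =====
theorem countHousePlacements_spec : Claim_equal_countHousePlacements := by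
  intro n _ hpre
  unfold Spec_countHousePlacements countHousePlacements countHousePlacements_alt
  have hpre' : 1 ≤ n := hpre
  obtain ⟨N, rfl⟩ : ∃ N : Nat, n = (N:Int) := ⟨n.toNat, by omega⟩
  have hN : 1 ≤ N := by omega
  simp only
  rw [show ((N:Int)+1).toNat = N + 1 by omega]
  have hfold := loopA_state N hN N hN le_rfl
  rw [show (fun (dp : List Int) (i : Int) => PySem.List.pySetD dp i
      (PySem.Int.mod (PySem.List.pyGetD dp (i - 1) 0 + PySem.List.pyGetD dp (i - 2) 0) (10^9+7)))
      = stepA from rfl, hfold]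
  have hlast : PySem.List.pyGetD ((List.range (N+1)).map (fun j => if j ≤ N then fibm j else 0)) (-1) 0
      = fibm N := by
    rw [PySem.List.pyGetD_neg_one _ _ (by simp)]
    rw [List.getLast_eq_getElem]
    simp
  rw [hlast]
  rw [show ((N:Int)+2).toNat = N + 2 by omega, fastFib_eq, fibm_eq]
  simp only
  rw [show (10:Int)^9+7 = pvM from rfl, pymod_eq, pymod_eq, pow_two]
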